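-- pv_equiv track=rewrite | github.com/AaronJai/UniProjects | CITS3002 Computer Networks/Lab1/task1.py | checking_codewords
-- ===== SOURCE A (Python) =====
-- def hamming_distance(codeword1, codeword2):
--     # check if codewords are same length
--     if len(codeword1) != len(codeword2):
--         raise ValueError("Codewords must be of the same length")
--
--     distance = 0
--
--     # Iterate through bits of the codewords
--     for bit1, bit2 in zip(codeword1, codeword2):
--         if bit1 != bit2:
--             distance += 1
--
--     return distance
--
-- def checking_codewords(codewords, received_data):
--     # Initialise variables
--     min_distance = float('inf')
--     corrected_codeword = None
--
--     # Iterate through codewords list given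
--     for codeword in codewords:
--         # Calculate the HDist between the received data and the current codeword
--         distance = hamming_distance(received_data, codeword)
--
--
--         # If the dist is smaller than the curr min, update the min and corrected codeword
--         if distance < min_distance:
--             min_distance = distance
--             corrected_codeword = codeword
--
--
--         # If the distance is equal to the curr min, it means there's a tie (error cannot be corrected)
--         elif distance == min_distance:
--             corrected_codeword = 'error detected'
--
--
--     return corrected_codeword
-- ===== SOURCE B (Python) =====
-- def hamming_distance(codeword1, codeword2):
--     if len(codeword1) != len(codeword2):
--         raise ValueError("Codewords must be of the same length")
--     distance = 0
--     for bit1, bit2 in zip(codeword1, codeword2):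
--         if bit1 != bit2:
--             distance += 1
--     return distance
--
-- def checking_codewords(codewords, received_data):
--     distances = [hamming_distance(received_data, cw) for cw in codewords]
--     if not distances:
--         return None
--     m = min(distances)
--     if distances.count(m) > 1:
--         return 'error detected'
--     return codewords[distances.index(m)]
-- ===== Notes on version B (the rewrite author's own statement) =====
-- stated objective: simpler
-- what changed: A's single-pass running-minimum-with-tie-flag loop is replaced by a build-then-reduce decomposition: compute the list of Hamming distances, then answer with min/count/index over that table.
import Mathlib
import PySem

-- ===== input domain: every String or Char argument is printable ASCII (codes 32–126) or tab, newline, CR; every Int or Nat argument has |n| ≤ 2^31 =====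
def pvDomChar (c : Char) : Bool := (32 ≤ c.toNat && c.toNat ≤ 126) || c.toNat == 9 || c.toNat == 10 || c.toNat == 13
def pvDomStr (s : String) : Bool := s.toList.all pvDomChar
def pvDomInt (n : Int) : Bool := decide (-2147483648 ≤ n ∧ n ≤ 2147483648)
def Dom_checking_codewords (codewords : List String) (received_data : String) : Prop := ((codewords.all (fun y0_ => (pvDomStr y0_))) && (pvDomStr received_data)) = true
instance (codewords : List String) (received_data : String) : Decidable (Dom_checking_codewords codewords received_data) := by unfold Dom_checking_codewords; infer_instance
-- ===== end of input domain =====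

-- B replaces A's running-minimum-with-tie-flag loop by a build-the-distance-table-then-reduce
-- decomposition (min / count / index over the distance list); objective: simpler.

-- ===== PORT A =====
-- hamming_distance: shared helper of both Pythons; the length-mismatch ValueError is excluded by Pre_.
def pvHamming (codeword1 codeword2 : String) : Int :=
  (codeword1.toList.zip codeword2.toList).foldl
    (fun distance p => if p.1 ≠ p.2 then distance + 1 else distance) 0

-- A's loop state: (min_distance, corrected_codeword); none in the first slot is float('inf').
def pvStepA (received_data : String) (st : Option Int × Option String) (codeword : String) :
    Option Int × Option String :=
  let distance := pvHamming received_data codeword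
  match st.1 with
  | none => (some distance, some codeword)
  | some m =>
      if distance < m then (some distance, some codeword)
      else if distance = m then (some m, some "error detected")
      else (some m, st.2)

def checking_codewords (codewords : List String) (received_data : String) : Option String :=
  (codewords.foldl (pvStepA received_data) (none, none)).2

-- ===== PORT B =====
def checking_codewords_alt (codewords : List String) (received_data : String) : Option String :=
  let distances := codewords.map (fun cw => pvHamming received_data cw)
  match PySem.List.min? distances (fun x => x) with
  | none => none
  | some m =>
      if 1 < PySem.List.count distances m then some "error detected"
      else (PySem.List.index? distances m).bind (fun i => codewords[i]?)

-- ===== PRECONDITION & SPEC =====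
-- Pre_ excludes exactly the inputs where hamming_distance raises ValueError (a codeword whose
-- length differs from received_data's); both A and B raise there.
def Pre_checking_codewords (codewords : List String) (received_data : String) : Prop :=
  ∀ cw ∈ codewords, cw.toList.length = received_data.toList.length
instance (codewords : List String) (received_data : String) : Decidable (Pre_checking_codewords codewords received_data) := by unfold Pre_checking_codewords; infer_instance

def pvWitness_checking_codewords : List String × String := (["000", "111"], "001")

def Spec_checking_codewords (codewords : List String) (received_data : String) (out : Option String) : Prop := out = checking_codewords_alt codewords received_data
instance (codewords : List String) (received_data : String) (out : Option String) : Decidable (Spec_checking_codewords codewords received_data out) := by unfold Spec_checking_codewords; infer_instance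

-- ===== CLAIM (what is proved, stated in full; the proofs are below) =====
def Claim_equal_checking_codewords : Prop := ∀ (codewords : List String) (received_data : String), Dom_checking_codewords codewords received_data → Pre_checking_codewords codewords received_data → Spec_checking_codewords codewords received_data (checking_codewords codewords received_data)

-- ===== LEMMAS AND PROOFS =====

-- min over a snoc (Python min of the distance table, built back from A's traversal order)
theorem min_snoc (l : List Int) (d : Int) :
    PySem.List.min? (l ++ [d]) (fun x => x) =
      some ((PySem.List.min? l (fun x => x)).elim d (fun m => min m d)) := by
  cases l with
  | nil => simp [PySem.List.min?]
  | cons x t =>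
      rw [List.cons_append, PySem.List.min?_id_cons, PySem.List.min?_id_cons]
      simp [List.foldl_append]

-- The heart of the proof: A's left fold carries exactly (min of the distance table, B's answer).
theorem loop_invariant (received_data : String) (codewords : List String) :
    codewords.foldl (pvStepA received_data) (none, none) =
      (PySem.List.min? (codewords.map (fun cw => pvHamming received_data cw)) (fun x => x),
       checking_codewords_alt codewords received_data) := by
  induction codewords using List.reverseRecOn with
  | nil => simp [checking_codewords_alt, PySem.List.min?]
  | append_singleton l c IH =>
      rw [List.foldl_append, IH]
      have hmap : (l ++ [c]).map (fun cw => pvHamming received_data cw)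
          = l.map (fun cw => pvHamming received_data cw) ++ [pvHamming received_data c] := by
        simp
      simp only [List.foldl_cons, List.foldl_nil, checking_codewords_alt, hmap, min_snoc]
      set d := pvHamming received_data c with hd
      set ds := l.map (fun cw => pvHamming received_data cw) with hds
      cases hmin : PySem.List.min? ds (fun x => x) with
      | none =>
          have hl' : l = [] := by
            have hl : ds = [] := (PySem.List.min?_eq_none_iff _ _).1 hmin
            cases l with
            | nil => rfl
            | cons a t => simp [hds] at hl
          subst hl'
          simp [pvStepA, PySem.List.count, PySem.List.index?, hds]
          exact hd.symm
      | some m =>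
          have hmem : m ∈ ds := PySem.List.min?_mem hmin
          have hle : ∀ y ∈ ds, m ≤ y := fun y hy => PySem.List.min?_isMin hmin y hy
          have hlen : ds.length = l.length := by simp [hds]
          simp only [Option.elim]
          rcases lt_trichotomy d m with hlt | heq | hgt
          · have hnot : d ∉ ds := fun h => absurd (hle d h) (by omega)
            have hcount : PySem.List.count (ds ++ [d]) d = 1 := by
              simp [PySem.List.count, List.count_append, List.count_eq_zero.2 hnot]
            have hmm : min m d = d := by omega
            rw [hmm, hcount, PySem.List.index?_append_singleton_self ds d hnot]
            simp only [pvStepA, ← hd, if_pos hlt]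
            simp [hlen]
          · subst heq
            have hcount : 1 < PySem.List.count (ds ++ [d]) d := by
              have : 1 ≤ List.count d ds := List.one_le_count_iff.2 hmem
              simp [PySem.List.count, List.count_append]
              omega
            rw [min_self, if_pos hcount]
            simp only [pvStepA, ← hd]
            simp
          · have hne : (d == m) = false := by simp; omega
            have hcount : PySem.List.count (ds ++ [d]) m = PySem.List.count ds m := by
              simp [PySem.List.count, List.count_append, List.count_singleton, hne]
            have hmm : min m d = m := by omega
            rw [hmm, hcount, PySem.List.index?_append_of_mem [d] hmem]
            simp only [pvStepA, ← hd]
            rw [if_neg (by omega : ¬ d < m), if_neg (by omega : ¬ d = m)]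
            congr 1
            split
            · rfl
            · cases hidx : PySem.List.index? ds m with
              | none => simp
              | some i =>
                  obtain ⟨hk, -, -⟩ := PySem.List.getElem_of_index?_eq_some hidx
                  simp only [Option.bind_some]
                  rw [List.getElem?_append_left (by omega : i < l.length)]

-- ===== VERDICT (by name: the statement is the Claim_ definition above) =====
theorem checking_codewords_spec : Claim_equal_checking_codewords := by
  intro codewords received_data _ _
  unfold Spec_checking_codewords checking_codewords
  rw [loop_invariant]
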